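-- pv_equiv track=rewrite | github.com/JoseCerezo90/TFM-Construccion-evolutiva-de-redes-de-neuronas-con-entrenamiento-parcial | Ejecuciones_1_preliminares/California/Asíncrono/Asincrono_TFM_California.py | __apply_derivation
-- ===== SOURCE A (Python) =====
-- def __apply_derivation(derivation_tree, new_derivation, non_terminal):
--     new_derivation_tree = ''
--     derivation_done = False
--     for i in range(len(derivation_tree)):
--         if derivation_tree[i] == non_terminal and not derivation_done:
--             new_derivation_tree += new_derivation
--             derivation_done = True
--         else:
--             new_derivation_tree += derivation_tree[i]
--     return new_derivation_tree
-- ===== SOURCE B (Python) =====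
-- def __apply_derivation(derivation_tree, new_derivation, non_terminal):
--     idx = next((i for i, c in enumerate(derivation_tree) if c == non_terminal), -1)
--     if idx == -1:
--         return derivation_tree
--     return derivation_tree[:idx] + new_derivation + derivation_tree[idx + 1:]
-- ===== Notes on version B (the rewrite author's own statement) =====
-- stated objective: simpler
-- what changed: B locates the index of the first matching character and splices with slices, instead of rebuilding the whole string character by character with an accumulator and a done flag.
import Mathlib
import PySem

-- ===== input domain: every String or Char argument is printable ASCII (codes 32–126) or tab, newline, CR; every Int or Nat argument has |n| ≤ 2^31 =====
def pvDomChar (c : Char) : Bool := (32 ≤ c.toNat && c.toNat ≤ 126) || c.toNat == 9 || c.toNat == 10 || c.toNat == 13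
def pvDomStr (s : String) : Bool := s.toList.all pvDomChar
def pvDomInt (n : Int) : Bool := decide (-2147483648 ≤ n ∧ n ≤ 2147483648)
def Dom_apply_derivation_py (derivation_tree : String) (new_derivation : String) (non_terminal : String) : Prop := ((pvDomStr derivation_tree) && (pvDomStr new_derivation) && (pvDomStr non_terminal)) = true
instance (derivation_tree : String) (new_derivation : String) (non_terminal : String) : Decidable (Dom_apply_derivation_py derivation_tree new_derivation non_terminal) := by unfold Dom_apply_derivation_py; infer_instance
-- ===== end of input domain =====

-- B replaces A's char-by-char accumulating loop (with a done flag) by locating the first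
-- matching character's index and splicing with take/drop slices; objective: simpler.


-- ===== PORT A =====
-- A's loop: for each char, if it equals non_terminal and not done, append new_derivation
-- and set the flag; else append the char. The accumulator is kept as List Char
-- (Python string concatenation = list append), converted to String once at the end.
def pvALoop (nt : String) (nd : List Char) : List Char → List Char → Bool → List Char
  | [], acc, _ => acc
  | c :: rest, acc, done =>
    if (String.ofList [c] == nt) && !done then
      pvALoop nt nd rest (acc ++ nd) true
    else
      pvALoop nt nd rest (acc ++ [c]) done

def apply_derivation_py (derivation_tree : String) (new_derivation : String) (non_terminal : String) : String :=
  String.ofList (pvALoop non_terminal new_derivation.toList derivation_tree.toList [] false)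

-- ===== PORT B =====
-- B: find the index of the first char equal to non_terminal; if none, return unchanged,
-- else splice derivation_tree[:idx] + new_derivation + derivation_tree[idx+1:].
def apply_derivation_py_alt (derivation_tree : String) (new_derivation : String) (non_terminal : String) : String :=
  match derivation_tree.toList.findIdx? (fun c => String.ofList [c] == non_terminal) with
  | none => derivation_tree
  | some i => String.ofList (derivation_tree.toList.take i ++ new_derivation.toList ++ derivation_tree.toList.drop (i + 1))

-- ===== PRECONDITION & SPEC =====
def Spec_apply_derivation_py (derivation_tree : String) (new_derivation : String) (non_terminal : String) (out : String) : Prop := out = apply_derivation_py_alt derivation_tree new_derivation non_terminal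
instance (derivation_tree : String) (new_derivation : String) (non_terminal : String) (out : String) : Decidable (Spec_apply_derivation_py derivation_tree new_derivation non_terminal out) := by unfold Spec_apply_derivation_py; infer_instance

-- ===== CLAIM (what is proved, stated in full; the proofs are below) =====
def Claim_equal_apply_derivation_py : Prop := ∀ (derivation_tree : String) (new_derivation : String) (non_terminal : String), Dom_apply_derivation_py derivation_tree new_derivation non_terminal → Spec_apply_derivation_py derivation_tree new_derivation non_terminal (apply_derivation_py derivation_tree new_derivation non_terminal)

-- ===== LEMMAS AND PROOFS =====
theorem pvALoop_done (nt : String) (nd : List Char) :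
    ∀ (l acc : List Char), pvALoop nt nd l acc true = acc ++ l := by
  intro l
  induction l with
  | nil => intro acc; simp [pvALoop]
  | cons c rest ih =>
    intro acc
    simp [pvALoop, ih]

theorem pvALoop_false (nt : String) (nd : List Char) :
    ∀ (l acc : List Char),
      pvALoop nt nd l acc false =
        match l.findIdx? (fun c => String.ofList [c] == nt) with
        | none => acc ++ l
        | some i => acc ++ (l.take i ++ nd ++ l.drop (i + 1)) := by
  intro l
  induction l with
  | nil => intro acc; simp [pvALoop]
  | cons c rest ih =>
    intro acc
    rw [List.findIdx?_cons]
    by_cases h : (String.ofList [c] == nt) = true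
    · simp [pvALoop, h, pvALoop_done]
    · have h' : (String.ofList [c] == nt) = false := by simpa using h
      simp only [pvALoop, h', Bool.false_and, Bool.false_eq_true, if_false]
      rw [ih]
      cases hf : rest.findIdx? (fun c => String.ofList [c] == nt) with
      | none => simp
      | some i => simp [List.take_succ_cons, List.drop_succ_cons]

-- ===== VERDICT (by name: the statement is the Claim_ definition above) =====
theorem apply_derivation_py_spec : Claim_equal_apply_derivation_py := by
  intro t nd nt _
  unfold Spec_apply_derivation_py apply_derivation_py apply_derivation_py_alt
  rw [pvALoop_false]
  cases hf : t.toList.findIdx? (fun c => String.ofList [c] == nt) with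
  | none => simp [String.ofList_toList]
  | some i => simp
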